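-- pv_equiv track=rewrite | github.com/KJH0406/Algorithm | 백준/Silver/3085. 사탕 게임/사탕 게임.py | check
-- ===== SOURCE A (Python) =====
-- def check(li):
--     li2 = []
--     for i in range(len(li)):
--         temp = []
--         for j in range(len(li)):
--             temp.append(li[j][i])
--         li2.append(temp)
--
--
--     cnt = []
--     for i in range(len(li)):
--         count = 1
--         for j in range(len(li)-1):
--             if li[i][j] == li[i][j+1]:
--                 count += 1
--             else:
--                 cnt.append(count)
--                 count = 1
--         cnt.append(count)
--     for i in range(len(li2)):
--         count = 1
--         for j in range(len(li2)-1):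
--             if li2[i][j] == li2[i][j+1]:
--                 count += 1
--             else:
--                 cnt.append(count)
--                 count = 1
--         cnt.append(count)
--     return max(cnt)
-- ===== SOURCE B (Python) =====
-- def check(li):
--     # Single fused pass: one horizontal run counter per row plus an array of
--     # per-column vertical run counters; every terminated run is recorded once.
--     n = len(li)
--     runs = []
--     vert = [1] * n
--     for i in range(n):
--         horiz = 1
--         for j in range(n):
--             if j > 0:
--                 if li[i][j] == li[i][j - 1]:
--                     horiz += 1
--                 else:
--                     runs.append(horiz)
--                     horiz = 1
--             if i > 0:
--                 if li[i][j] == li[i - 1][j]: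
--                     vert[j] += 1
--                 else:
--                     runs.append(vert[j])
--                     vert[j] = 1
--         runs.append(horiz)
--     runs.extend(vert)
--     return max(runs)
-- ===== Notes on version B (the rewrite author's own statement) =====
-- stated objective: faster
-- what changed: Replaces A's build-the-transpose-then-two-nested-scan-passes with one fused traversal of the grid that keeps a horizontal run counter and an array of per-column vertical run counters, recording each terminated run once.
-- outside the precondition, e.g. on check([]): A raises ValueError, B raises ValueError
import Mathlib
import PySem

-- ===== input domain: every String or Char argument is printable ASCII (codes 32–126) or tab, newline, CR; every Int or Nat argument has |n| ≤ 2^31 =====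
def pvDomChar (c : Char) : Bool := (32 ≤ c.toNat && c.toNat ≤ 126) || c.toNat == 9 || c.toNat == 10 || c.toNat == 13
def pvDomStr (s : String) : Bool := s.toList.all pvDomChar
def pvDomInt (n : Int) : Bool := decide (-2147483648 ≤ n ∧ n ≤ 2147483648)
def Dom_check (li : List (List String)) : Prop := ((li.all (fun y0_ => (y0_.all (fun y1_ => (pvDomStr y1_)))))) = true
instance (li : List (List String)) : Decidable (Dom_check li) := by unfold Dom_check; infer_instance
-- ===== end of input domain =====

-- B replaces A's build-the-transpose-then-two-separate-scan-passes with one fused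
-- traversal keeping a horizontal run counter and per-column vertical run counters.

-- ===== PORT A =====
-- li[i] / row[j] indexing (IndexError totalized with a default; Pre_check keeps indices in range)
def pvGetR (li : List (List String)) (i : Int) : List String := PySem.List.pyGetD li i []
def pvGetS (xs : List String) (i : Int) : String := PySem.List.pyGetD xs i ""

def check (li : List (List String)) : Int :=
  let n : Int := PySem.List.len li
  -- li2 = transpose built by the double loop
  let li2 : List (List String) :=
    (PySem.List.pyRange 0 n 1).map (fun i =>
      (PySem.List.pyRange 0 n 1).map (fun j => pvGetS (pvGetR li j) i))
  -- first pass: rows of li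
  let cnt : List Int :=
    (PySem.List.pyRange 0 n 1).foldl (fun cnt i =>
      let st := (PySem.List.pyRange 0 (n - 1) 1).foldl
        (fun (st : Int × List Int) j =>
          if pvGetS (pvGetR li i) j = pvGetS (pvGetR li i) (j + 1)
          then (st.1 + 1, st.2) else (1, st.2 ++ [st.1])) (1, cnt)
      st.2 ++ [st.1]) []
  -- second pass: rows of li2
  let n2 : Int := PySem.List.len li2
  let cnt2 : List Int :=
    (PySem.List.pyRange 0 n2 1).foldl (fun cnt i =>
      let st := (PySem.List.pyRange 0 (n2 - 1) 1).foldl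
        (fun (st : Int × List Int) j =>
          if pvGetS (pvGetR li2 i) j = pvGetS (pvGetR li2 i) (j + 1)
          then (st.1 + 1, st.2) else (1, st.2 ++ [st.1])) (1, cnt)
      st.2 ++ [st.1]) cnt
  -- max(cnt) — ValueError on the empty grid, excluded by Pre_check
  (PySem.List.max? cnt2 (fun y => y)).getD 0

-- ===== PORT B =====
def check_alt (li : List (List String)) : Int :=
  let n : Int := PySem.List.len li
  let vert0 : List Int := PySem.List.pyRepeat [(1 : Int)] n
  -- one fused pass; state = (vert, runs); inner state = (horiz, vert, runs)
  let st :=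
    (PySem.List.pyRange 0 n 1).foldl
      (fun (st : List Int × List Int) i =>
        let inner :=
          (PySem.List.pyRange 0 n 1).foldl
            (fun (s : Int × List Int × List Int) j =>
              let s :=
                if 0 < j then
                  (if pvGetS (pvGetR li i) j = pvGetS (pvGetR li i) (j - 1)
                   then (s.1 + 1, s.2.1, s.2.2)
                   else (1, s.2.1, s.2.2 ++ [s.1]))
                else s
              if 0 < i then
                (if pvGetS (pvGetR li i) j = pvGetS (pvGetR li (i - 1)) j
                 then (s.1, PySem.List.pySetD s.2.1 j (PySem.List.pyGetD s.2.1 j 0 + 1), s.2.2)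
                 else (s.1, PySem.List.pySetD s.2.1 j 1, s.2.2 ++ [PySem.List.pyGetD s.2.1 j 0]))
              else s)
            (1, st.1, st.2)
        (inner.2.1, inner.2.2 ++ [inner.1]))
      (vert0, [])
  -- max(runs + vert) — ValueError on the empty grid, excluded by Pre_check
  (PySem.List.max? (st.2 ++ st.1) (fun y => y)).getD 0

-- ===== PRECONDITION & SPEC =====
-- Pre: exactly where Python A returns: a nonempty grid (max([]) is ValueError on [])
-- whose rows all have length ≥ len(li) (shorter rows raise IndexError).
def Pre_check (li : List (List String)) : Prop :=
  li ≠ [] ∧ ∀ r ∈ li, li.length ≤ r.length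
instance (li : List (List String)) : Decidable (Pre_check li) := by unfold Pre_check; infer_instance

def pvWitness_check : List (List String) := [["a", "b"], ["a", "a"]]

def Spec_check (li : List (List String)) (out : Int) : Prop := out = check_alt li
instance (li : List (List String)) (out : Int) : Decidable (Spec_check li out) := by unfold Spec_check; infer_instance

-- ===== CLAIM (what is proved, stated in full; the proofs are below) =====
def Claim_equal_check : Prop := ∀ (li : List (List String)), Dom_check li → Pre_check li → Spec_check li (check li)

-- ===== LEMMAS AND PROOFS =====

-- grid entry (totalized like the ports)
def pvE (li : List (List String)) (i j : Nat) : String := (li.getD i []).getD j ""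

-- run-length machine: (body of completed runs, length of the open last run)
def scanRuns : String → Int → List String → List Int × Int
  | _, c, [] => ([], c)
  | p, c, x :: xs =>
    if p = x then scanRuns x (c + 1) xs
    else (c :: (scanRuns x 1 xs).1, (scanRuns x 1 xs).2)

def runsOf : List String → List Int
  | [] => []
  | x :: xs => (scanRuns x 1 xs).1 ++ [(scanRuns x 1 xs).2]

def pvRow (li : List (List String)) (n i : Nat) : List String :=
  (List.range n).map (fun j => pvE li i j)
def pvCol (li : List (List String)) (n j : Nat) : List String :=
  (List.range n).map (fun i => pvE li i j)

-- the cnt list A builds, in normalized form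
def cntA (li : List (List String)) : List Int :=
  (List.range li.length).flatMap (fun i => runsOf (pvRow li li.length i)) ++
  (List.range li.length).flatMap (fun j => runsOf (pvCol li li.length j))

-- B's Nat-index model of one inner step
def bstep (li : List (List String)) (i : Nat) (s : Int × List Int × List Int) (j : Nat) :
    Int × List Int × List Int :=
  let s :=
    if 0 < j then
      (if pvE li i j = pvE li i (j - 1) then (s.1 + 1, s.2.1, s.2.2)
       else (1, s.2.1, s.2.2 ++ [s.1]))
    else s
  if 0 < i then
    (if pvE li i j = pvE li (i - 1) j then (s.1, s.2.1.set j (s.2.1.getD j 0 + 1), s.2.2)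
     else (s.1, s.2.1.set j 1, s.2.2 ++ [s.2.1.getD j 0]))
  else s

def bouter (li : List (List String)) (n : Nat) (st : List Int × List Int) (i : Nat) :
    List Int × List Int :=
  let inner := (List.range n).foldl (bstep li i) (1, st.1, st.2)
  (inner.2.1, inner.2.2 ++ [inner.1])

def hlastR (li : List (List String)) (i : Nat) : Nat → Int
  | 0 => 1
  | m + 1 => if 0 < m then (if pvE li i m = pvE li i (m - 1) then hlastR li i m + 1 else 1) else 1

def hemitR (li : List (List String)) (i j : Nat) : List Int :=
  if 0 < j ∧ ¬ pvE li i j = pvE li i (j - 1) then [hlastR li i j] else []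

def vemitR (li : List (List String)) (i : Nat) (vert : List Int) (j : Nat) : List Int :=
  if pvE li i j = pvE li (i - 1) j then [] else [vert.getD j 0]

def vnewR (li : List (List String)) (i : Nat) (vert : List Int) (j : Nat) : Int :=
  if pvE li i j = pvE li (i - 1) j then vert.getD j 0 + 1 else 1

-- scan of the column prefix rows 0..i
def colScan (li : List (List String)) (j i : Nat) : List Int × Int :=
  scanRuns (pvE li 0 j) 1 ((List.range i).map (fun k => pvE li (k + 1) j))

-- ------- general helpers -------

theorem foldl_pyRange_zero {γ : Type} (n : Nat) (f : γ → Int → γ) (init : γ) :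
    (PySem.List.pyRange 0 (n : Int) 1).foldl f init
      = (List.range n).foldl (fun acc (k : Nat) => f acc (k : Int)) init := by
  rw [PySem.List.pyRange_one]
  simp only [sub_zero, Int.toNat_natCast, zero_add, List.foldl_map]

theorem map_pyRange_zero {β : Type} (n : Nat) (f : Int → β) :
    (PySem.List.pyRange 0 (n : Int) 1).map f = (List.range n).map (fun (k : Nat) => f (k : Int)) := by
  rw [PySem.List.pyRange_one]
  simp only [sub_zero, Int.toNat_natCast, zero_add, List.map_map]
  rfl

theorem max?_perm (l1 l2 : List Int) (h : l1.Perm l2) :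
    PySem.List.max? l1 (fun y => y) = PySem.List.max? l2 (fun y => y) := by
  rcases l1 with _ | ⟨a, t⟩
  · simp [h.nil_eq.symm]
  · have h2 : l2 ≠ [] := by intro he; subst he; exact absurd h.symm.nil_eq (by simp)
    obtain ⟨m1, hm1⟩ : ∃ m, PySem.List.max? (a :: t) (fun y => y) = some m := by
      cases hx : PySem.List.max? (a :: t) (fun y => y) with
      | none => exact absurd ((PySem.List.max?_eq_none_iff _ _).1 hx) (by simp)
      | some m => exact ⟨m, rfl⟩
    obtain ⟨m2, hm2⟩ : ∃ m, PySem.List.max? l2 (fun y => y) = some m := by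
      cases hx : PySem.List.max? l2 (fun y => y) with
      | none => exact absurd ((PySem.List.max?_eq_none_iff _ _).1 hx) h2
      | some m => exact ⟨m, rfl⟩
    rw [hm1, hm2]
    have e1 := PySem.List.max?_mem hm1
    have e2 := PySem.List.max?_mem hm2
    have le1 := PySem.List.max?_isMax hm1 m2 (h.symm.mem_iff.1 e2)
    have le2 := PySem.List.max?_isMax hm2 m1 (h.mem_iff.1 e1)
    exact congrArg some (le_antisymm le2 le1)

theorem coe_flatMap_sum (l : List Nat) (f : Nat → List Int) :
    (↑(l.flatMap f) : Multiset Int) = (l.map (fun x => (↑(f x) : Multiset Int))).sum := by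
  induction l with
  | nil => simp
  | cons a t ih => simp [List.flatMap_cons, ← ih, ← Multiset.coe_add]

-- ------- scanRuns -------

theorem scanRuns_snoc (xs : List String) (p : String) (c : Int) (x : String) :
    scanRuns p c (xs ++ [x])
      = (if (p :: xs).getLast (by simp) = x
         then ((scanRuns p c xs).1, (scanRuns p c xs).2 + 1)
         else ((scanRuns p c xs).1 ++ [(scanRuns p c xs).2], 1)) := by
  induction xs generalizing p c with
  | nil =>
    simp only [List.nil_append, List.getLast_singleton, scanRuns]
  | cons y ys ih =>
    have hg : (p :: y :: ys).getLast (by simp) = (y :: ys).getLast (by simp) := by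
      simp [List.getLast_cons]
    simp only [List.cons_append, scanRuns, hg, ih]
    by_cases h : p = y
    · simp [h]
    · simp only [if_neg h]
      by_cases h2 : (y :: ys).getLast (by simp) = x <;> simp [h2]

-- ------- A side -------

theorem foldA_list (x : String) (xs : List String) (c : Int) (acc : List Int) :
    (List.range xs.length).foldl
      (fun (st : Int × List Int) j =>
        if (x :: xs).getD j "" = (x :: xs).getD (j + 1) "" then (st.1 + 1, st.2)
        else (1, st.2 ++ [st.1]))
      (c, acc)
    = ((scanRuns x c xs).2, acc ++ (scanRuns x c xs).1) := by
  induction xs generalizing x c acc with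
  | nil => simp [scanRuns]
  | cons y ys ih =>
    simp only [List.length_cons, List.range_succ_eq_map, List.foldl_cons, List.foldl_map]
    have h0 : (x :: y :: ys).getD 0 "" = x := rfl
    have h1 : (x :: y :: ys).getD 1 "" = y := rfl
    rw [h0, h1]
    by_cases h : x = y
    · simp only [if_pos h, scanRuns]
      rw [← ih y (c + 1) acc]
      rfl
    · simp only [if_neg h, scanRuns]
      rw [show acc ++ (c :: (scanRuns y 1 ys).1) = (acc ++ [c]) ++ (scanRuns y 1 ys).1 by simp]
      rw [← ih y 1 (acc ++ [c])]
      rfl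

theorem getD_cons_map (f : Nat → String) (m j : Nat) (h : j ≤ m) :
    (f 0 :: (List.range m).map (fun k => f (k + 1))).getD j "" = f j := by
  cases j with
  | zero => rfl
  | succ j =>
    have hj : j < m := by omega
    simp [List.getD, hj]

theorem range_map_decomp (f : Nat → String) (m : Nat) :
    (List.range (m + 1)).map f = f 0 :: (List.range m).map (fun k => f (k + 1)) := by
  rw [List.range_succ_eq_map]
  simp [List.map_map]

theorem rowPassF (f : Nat → String) (n : Nat) (hn : 0 < n) (acc : List Int) :
    (let st := (List.range (n - 1)).foldl
        (fun (st : Int × List Int) j =>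
          if f j = f (j + 1) then (st.1 + 1, st.2) else (1, st.2 ++ [st.1])) (1, acc);
      st.2 ++ [st.1])
    = acc ++ runsOf ((List.range n).map f) := by
  obtain ⟨m, rfl⟩ : ∃ m, n = m + 1 := ⟨n - 1, by omega⟩
  rw [range_map_decomp]
  have hcongr : (List.range m).foldl
      (fun (st : Int × List Int) j =>
        if f j = f (j + 1) then (st.1 + 1, st.2) else (1, st.2 ++ [st.1])) (1, acc)
      = (List.range m).foldl
      (fun (st : Int × List Int) j =>
        if (f 0 :: (List.range m).map (fun k => f (k + 1))).getD j ""
           = (f 0 :: (List.range m).map (fun k => f (k + 1))).getD (j + 1) ""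
        then (st.1 + 1, st.2) else (1, st.2 ++ [st.1])) (1, acc) := by
    apply PySem.List.foldl_congr_mem
    intro st j hj
    have hj' : j < m := List.mem_range.1 hj
    rw [getD_cons_map f m j (by omega), getD_cons_map f m (j + 1) (by omega)]
  have hlen : ((List.range m).map (fun k => f (k + 1))).length = m := by simp
  have key := foldA_list (f 0) ((List.range m).map (fun k => f (k + 1))) 1 acc
  rw [hlen] at key
  simp only [Nat.add_sub_cancel, hcongr, key]
  simp [runsOf]

theorem getD_map_range' {β : Type} (g : Nat → β) (m j : Nat) (d : β) (h : j < m) :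
    ((List.range m).map g).getD j d = g j := by
  simp [List.getD, h]

theorem passGeneric (n : Nat) (hn : 0 < n)
    (acc : Int → Int → String) (f : Nat → Nat → String)
    (hacc : ∀ i j : Nat, i < n → j < n → acc (i : Int) (j : Int) = f i j) (init : List Int) :
    (List.range n).foldl (fun cnt (i : Nat) =>
      let st := (List.range (n - 1)).foldl
        (fun (st : Int × List Int) (j : Nat) =>
          if acc (i : Int) (j : Int) = acc (i : Int) ((j : Int) + 1)
          then (st.1 + 1, st.2) else (1, st.2 ++ [st.1])) (1, cnt);
      st.2 ++ [st.1]) init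
    = init ++ (List.range n).flatMap (fun i => runsOf ((List.range n).map (f i))) := by
  have hstep : ∀ cnt : List Int, ∀ i ∈ List.range n,
      (let st := (List.range (n - 1)).foldl
        (fun (st : Int × List Int) (j : Nat) =>
          if acc (i : Int) (j : Int) = acc (i : Int) ((j : Int) + 1)
          then (st.1 + 1, st.2) else (1, st.2 ++ [st.1])) (1, cnt);
       st.2 ++ [st.1]) = cnt ++ runsOf ((List.range n).map (f i)) := by
    intro cnt i hi
    have hi' : i < n := List.mem_range.1 hi
    have hcong : (List.range (n - 1)).foldl
        (fun (st : Int × List Int) (j : Nat) =>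
          if acc (i : Int) (j : Int) = acc (i : Int) ((j : Int) + 1)
          then (st.1 + 1, st.2) else (1, st.2 ++ [st.1])) (1, cnt)
        = (List.range (n - 1)).foldl
        (fun (st : Int × List Int) (j : Nat) =>
          if f i j = f i (j + 1)
          then (st.1 + 1, st.2) else (1, st.2 ++ [st.1])) (1, cnt) := by
      apply PySem.List.foldl_congr_mem
      intro st j hj
      have hj' : j < n - 1 := List.mem_range.1 hj
      rw [show ((j : Int) + 1) = ((j + 1 : Nat) : Int) by push_cast; ring]
      rw [hacc i j hi' (by omega), hacc i (j + 1) hi' (by omega)]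
    simp only [hcong]
    exact rowPassF (f i) n hn cnt
  rw [PySem.List.foldl_congr_mem _ _
    (fun cnt (i : Nat) => cnt ++ runsOf ((List.range n).map (f i))) _ hstep]
  exact PySem.List.foldl_append_eq_flatMap _ _ init

theorem check_eq_cntA (li : List (List String)) (hn : li ≠ []) :
    check li = (PySem.List.max? (cntA li) (fun y => y)).getD 0 := by
  unfold check
  have hn : 0 < li.length := List.length_pos_iff.2 hn
  simp only [PySem.List.len_eq, map_pyRange_zero, foldl_pyRange_zero]
  rw [show ((li.length : Int) - 1) = ((li.length - 1 : Nat) : Int) by omega]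
  simp only [foldl_pyRange_zero]
  set F : Nat → List String :=
    fun i => (List.range li.length).map (fun (j : Nat) => pvGetS (pvGetR li (j : Int)) (i : Int))
    with hF
  rw [passGeneric li.length hn (fun i j => pvGetS (pvGetR li i) j) (fun i j => pvE li i j)
    (by intro i j hi hj; simp [pvGetS, pvGetR, pvE, PySem.List.pyGetD_natCast]) []]
  have hlen2 : ((List.range li.length).map F).length = li.length := by simp
  rw [hlen2]
  rw [show ((li.length : Int) - 1) = ((li.length - 1 : Nat) : Int) by omega]
  simp only [foldl_pyRange_zero]
  rw [passGeneric li.length hn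
    (fun i j => pvGetS (pvGetR ((List.range li.length).map F) i) j) (fun i j => pvE li j i)
    (by
      intro i j hi hj
      simp only [pvGetS, pvGetR, PySem.List.pyGetD_natCast]
      rw [getD_map_range' F li.length i [] hi]
      rw [hF]
      rw [getD_map_range' _ li.length j "" hj]
      simp [pvGetS, pvGetR, pvE, PySem.List.pyGetD_natCast]) _]
  unfold cntA pvRow pvCol
  simp

-- ------- B side -------

theorem stepBridge (li : List (List String)) (i j : Nat) (s : Int × List Int × List Int) :
    (let s' :=
        if (0 : Int) < (j : Int) then
          (if pvGetS (pvGetR li (i : Int)) (j : Int) = pvGetS (pvGetR li (i : Int)) ((j : Int) - 1)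
           then (s.1 + 1, s.2.1, s.2.2)
           else (1, s.2.1, s.2.2 ++ [s.1]))
        else s
      if (0 : Int) < (i : Int) then
        (if pvGetS (pvGetR li (i : Int)) (j : Int) = pvGetS (pvGetR li ((i : Int) - 1)) (j : Int)
         then (s'.1, PySem.List.pySetD s'.2.1 (j : Int) (PySem.List.pyGetD s'.2.1 (j : Int) 0 + 1), s'.2.2)
         else (s'.1, PySem.List.pySetD s'.2.1 (j : Int) 1, s'.2.2 ++ [PySem.List.pyGetD s'.2.1 (j : Int) 0]))
      else s')
    = bstep li i s j := by
  unfold bstep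
  by_cases hj : 0 < j
  · have hj1 : ((j : Int) - 1) = ((j - 1 : Nat) : Int) := by omega
    by_cases hi : 0 < i
    · have hi1 : ((i : Int) - 1) = ((i - 1 : Nat) : Int) := by omega
      simp only [Int.natCast_pos, hj, hi, if_pos, hj1, hi1, pvE, pvGetS, pvGetR,
        PySem.List.pyGetD_natCast, PySem.List.pySetD_natCast]
      rfl
    · simp only [Int.natCast_pos, hj, hi, if_pos, hj1, pvE, pvGetS, pvGetR,
        PySem.List.pyGetD_natCast]
      rfl
  · by_cases hi : 0 < i
    · have hi1 : ((i : Int) - 1) = ((i - 1 : Nat) : Int) := by omega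
      simp only [Int.natCast_pos, hj, hi, if_pos, hi1, pvE, pvGetS, pvGetR,
        PySem.List.pyGetD_natCast, PySem.List.pySetD_natCast]
      rfl
    · simp [Int.natCast_pos, hj, hi]

theorem check_alt_eq_fold (li : List (List String)) :
    check_alt li =
      (let st := (List.range li.length).foldl (bouter li li.length)
          (List.replicate li.length 1, [])
       (PySem.List.max? (st.2 ++ st.1) (fun y => y)).getD 0) := by
  unfold check_alt
  simp only [PySem.List.len_eq, PySem.List.pyRepeat_singleton, Int.toNat_natCast,
    foldl_pyRange_zero]
  have houter : ∀ st : List Int × List Int, ∀ i ∈ List.range li.length,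
      (fun (st : List Int × List Int) (i : Nat) =>
        let inner :=
          (List.range li.length).foldl
            (fun (s : Int × List Int × List Int) (j : Nat) =>
              let s :=
                if (0 : Int) < (j : Int) then
                  (if pvGetS (pvGetR li (i : Int)) (j : Int) = pvGetS (pvGetR li (i : Int)) ((j : Int) - 1)
                   then (s.1 + 1, s.2.1, s.2.2)
                   else (1, s.2.1, s.2.2 ++ [s.1]))
                else s
              if (0 : Int) < (i : Int) then
                (if pvGetS (pvGetR li (i : Int)) (j : Int) = pvGetS (pvGetR li ((i : Int) - 1)) (j : Int)
                 then (s.1, PySem.List.pySetD s.2.1 (j : Int) (PySem.List.pyGetD s.2.1 (j : Int) 0 + 1), s.2.2)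
                 else (s.1, PySem.List.pySetD s.2.1 (j : Int) 1, s.2.2 ++ [PySem.List.pyGetD s.2.1 (j : Int) 0]))
              else s)
            (1, st.1, st.2)
        (inner.2.1, inner.2.2 ++ [inner.1])) st i
      = bouter li li.length st i := by
    intro st i _
    have hfold := PySem.List.foldl_congr_mem (List.range li.length) _ (bstep li i)
      ((1 : Int), st.1, st.2) (fun s j _ => stepBridge li i j s)
    beta_reduce
    simp only [hfold]
    rfl
  rw [PySem.List.foldl_congr_mem _ _ (bouter li li.length) _ houter]


theorem setFold_getD_ge (g : Nat → Int) (vert : List Int) (m k : Nat) (hk : m ≤ k) :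
    ((List.range m).foldl (fun v j => v.set j (g j)) vert).getD k 0 = vert.getD k 0 := by
  induction m with
  | zero => simp
  | succ m ih =>
    rw [List.range_succ, List.foldl_append]
    simp only [List.foldl_cons, List.foldl_nil]
    rw [List.getD, List.getElem?_set]
    simp only [show ¬ m = k by omega, if_false]
    exact ih (by omega)

theorem setFold_len (g : Nat → Int) (vert : List Int) (m : Nat) :
    ((List.range m).foldl (fun v j => v.set j (g j)) vert).length = vert.length := by
  induction m with
  | zero => simp
  | succ m ih => rw [List.range_succ, List.foldl_append]; simpa using ih

theorem setFold_getElem? (g : Nat → Int) (vert : List Int) (n m k : Nat)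
    (hlen : vert.length = n) (hk : k < m) (hkn : k < n) :
    ((List.range m).foldl (fun v j => v.set j (g j)) vert)[k]? = some (g k) := by
  induction m with
  | zero => omega
  | succ m ih =>
    rw [List.range_succ, List.foldl_append]
    simp only [List.foldl_cons, List.foldl_nil]
    rw [List.getElem?_set]
    by_cases h : m = k
    · subst h
      rw [if_pos rfl, if_pos (by rw [setFold_len, hlen]; omega)]
    · rw [if_neg h]
      exact ih (by omega)

theorem setFold_eq_map (g : Nat → Int) (vert : List Int) (n : Nat) (hlen : vert.length = n) :
    (List.range n).foldl (fun v j => v.set j (g j)) vert = (List.range n).map g := by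
  apply List.ext_getElem?
  intro k
  by_cases hk : k < n
  · rw [setFold_getElem? g vert n n k hlen hk hk]
    simp [hk]
  · rw [List.getElem?_eq_none (by rw [setFold_len, hlen]; omega),
      List.getElem?_eq_none (by simp; omega)]

theorem bRow (li : List (List String)) (i : Nat) (hi : 0 < i) (vert runs : List Int) (m : Nat) :
    (List.range m).foldl (bstep li i) (1, vert, runs)
      = (hlastR li i m,
         (List.range m).foldl (fun v j => v.set j (vnewR li i vert j)) vert,
         runs ++ (List.range m).flatMap (fun j => hemitR li i j ++ vemitR li i vert j)) := by
  induction m with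
  | zero => simp [hlastR]
  | succ m ih =>
    rw [List.range_succ, List.foldl_append, ih]
    simp only [List.foldl_cons, List.foldl_nil]
    rw [List.flatMap_append, List.flatMap_cons, List.flatMap_nil,
      List.append_nil, ← List.append_assoc]
    rw [List.foldl_append (l := List.range m) (l' := [m])]
    simp only [List.foldl_cons, List.foldl_nil]
    have hget : ((List.range m).foldl (fun v j => v.set j (vnewR li i vert j)) vert).getD m 0
        = vert.getD m 0 := setFold_getD_ge _ _ m m (le_refl m)
    simp only [List.getD, vnewR] at hget
    unfold bstep hemitR vemitR vnewR
    by_cases hm : 0 < m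
    · by_cases he : pvE li i m = pvE li i (m - 1)
      · by_cases hv : pvE li i m = pvE li (i - 1) m
        · simp [hm, eq_true he, eq_true hv, hi, hlastR, hget]
        · simp [hm, eq_true he, eq_false hv, hi, hlastR, hget]
      · by_cases hv : pvE li i m = pvE li (i - 1) m
        · simp [hm, eq_false he, eq_true hv, hi, hlastR, hget]
        · simp [hm, eq_false he, eq_false hv, hi, hlastR, hget]
    · have hm0 : m = 0 := by omega
      subst hm0
      by_cases hv : pvE li i 0 = pvE li (i - 1) 0
      · simp [eq_true hv, hi, hlastR]
      · simp [eq_false hv, hi, hlastR]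

theorem bRow0 (li : List (List String)) (vert runs : List Int) (m : Nat) :
    (List.range m).foldl (bstep li 0) (1, vert, runs)
      = (hlastR li 0 m, vert, runs ++ (List.range m).flatMap (fun j => hemitR li 0 j)) := by
  induction m with
  | zero => simp [hlastR]
  | succ m ih =>
    rw [List.range_succ, List.foldl_append, ih]
    simp only [List.foldl_cons, List.foldl_nil]
    rw [List.flatMap_append, List.flatMap_cons, List.flatMap_nil,
      List.append_nil, ← List.append_assoc]
    unfold bstep hemitR
    by_cases hm : 0 < m
    · by_cases he : pvE li 0 m = pvE li 0 (m - 1)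
      · simp [hm, he, hlastR]
      · simp [hm, he, hlastR]
    · have hm0 : m = 0 := by omega
      subst hm0
      simp [hlastR]
theorem getLast_cons_map (g : Nat → String) (m : Nat)
    (h : (g 0 :: (List.range m).map (fun k => g (k + 1))) ≠ []) :
    (g 0 :: (List.range m).map (fun k => g (k + 1))).getLast h = g m := by
  induction m with
  | zero => simp
  | succ m _ =>
    have hd : g 0 :: (List.range (m + 1)).map (fun k => g (k + 1))
        = (g 0 :: (List.range m).map (fun k => g (k + 1))) ++ [g (m + 1)] := by
      rw [List.range_succ]; simp
    rw [List.getLast_congr _ _ hd, List.getLast_append] <;> simp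

theorem scan_prefix (li : List (List String)) (i : Nat) (m : Nat) (hm : 0 < m) :
    scanRuns (pvE li i 0) 1 ((List.range (m - 1)).map (fun k => pvE li i (k + 1)))
      = ((List.range m).flatMap (fun j => hemitR li i j), hlastR li i m) := by
  induction m with
  | zero => omega
  | succ m ih =>
    by_cases hm1 : 0 < m
    · have hdec : List.range (m + 1 - 1) = List.range (m - 1) ++ [m - 1] := by
        rw [show m + 1 - 1 = (m - 1) + 1 by omega, List.range_succ]
      rw [hdec, List.map_append]
      simp only [List.map_cons, List.map_nil]
      rw [show m - 1 + 1 = m by omega]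
      rw [scanRuns_snoc, ih hm1, getLast_cons_map (fun k => pvE li i k)]
      rw [List.range_succ, List.flatMap_append, List.flatMap_cons, List.flatMap_nil,
        List.append_nil]
      have hl : hlastR li i (m + 1)
          = if 0 < m then (if pvE li i m = pvE li i (m - 1) then hlastR li i m + 1 else 1) else 1 :=
        rfl
      by_cases he : pvE li i m = pvE li i (m - 1)
      · rw [if_pos (he.symm), hl]
        unfold hemitR
        simp [hm1, eq_true he]
      · rw [if_neg (fun hx => he hx.symm), hl]
        unfold hemitR
        simp [hm1, eq_false he]
    · have hm0 : m = 0 := by omega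
      subst hm0
      simp [scanRuns, hemitR, hlastR]

theorem hruns (li : List (List String)) (i n : Nat) (hn : 0 < n) :
    (List.range n).flatMap (fun j => hemitR li i j) ++ [hlastR li i n]
      = runsOf (pvRow li n i) := by
  unfold pvRow
  obtain ⟨m, rfl⟩ : ∃ m, n = m + 1 := ⟨n - 1, by omega⟩
  rw [range_map_decomp]
  have hs := scan_prefix li i (m + 1) hn
  rw [Nat.add_sub_cancel] at hs
  simp [runsOf, hs]

theorem colScan_succ (li : List (List String)) (j i : Nat) :
    colScan li j (i + 1)
      = (if pvE li i j = pvE li (i + 1) j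
         then ((colScan li j i).1, (colScan li j i).2 + 1)
         else ((colScan li j i).1 ++ [(colScan li j i).2], 1)) := by
  unfold colScan
  rw [List.range_succ, List.map_append]
  simp only [List.map_cons, List.map_nil]
  rw [scanRuns_snoc]
  rcases i with _ | i
  · simp [scanRuns]
  · rw [getLast_cons_map (fun k => pvE li k j)]

-- outer invariant: after processing rows 0..i-1 (1 ≤ i ≤ n)
theorem bOuterInv (li : List (List String)) (n : Nat) (hn : n = li.length) (i : Nat)
    (hi1 : 1 ≤ i) (hi2 : i ≤ n) :
    ∃ R : List Int,
      (List.range i).foldl (bouter li n) (List.replicate n 1, []) =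
        ((List.range n).map (fun j => (colScan li j (i - 1)).2), R) ∧
      (↑R : Multiset Int)
        = ((List.range i).map (fun k => (↑(runsOf (pvRow li n k)) : Multiset Int))).sum
          + ((List.range n).map (fun j => (↑((colScan li j (i - 1)).1) : Multiset Int))).sum := by
  induction i with
  | zero => omega
  | succ i ih =>
    by_cases hi0 : i = 0
    · subst hi0
      refine ⟨runsOf (pvRow li n 0), ?_, ?_⟩
      · rw [show List.range 1 = [0] from rfl]
        simp only [List.foldl_cons, List.foldl_nil]
        unfold bouter
        rw [bRow0]
        have hv : (List.range n).map (fun j => (colScan li j 0).2) = List.replicate n 1 := by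
          simp [colScan, scanRuns, List.map_const']
        rw [hv]
        rw [Prod.ext_iff]
        refine ⟨rfl, ?_⟩
        simp only [List.nil_append]
        exact hruns li 0 n (by omega)
      · rw [show List.range 1 = [0] from rfl]
        simp [colScan, scanRuns]
    · have hipos : 0 < i := by omega
      obtain ⟨R, hfold, hR⟩ := ih (by omega) (by omega)
      rw [List.range_succ, List.foldl_append, hfold]
      simp only [List.foldl_cons, List.foldl_nil]
      unfold bouter
      rw [bRow li i hipos]
      have hVlen : ((List.range n).map (fun j => (colScan li j (i - 1)).2)).length = n := by simp
      rw [setFold_eq_map _ _ n hVlen]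
      have hmapeq : (List.range n).map (vnewR li i ((List.range n).map (fun j => (colScan li j (i - 1)).2)))
          = (List.range n).map (fun j => (colScan li j (i + 1 - 1)).2) := by
        apply List.map_congr_left
        intro j hj
        have hjn : j < n := List.mem_range.1 hj
        have hgd : ((List.range n).map (fun j => (colScan li j (i - 1)).2)).getD j 0
            = (colScan li j (i - 1)).2 := getD_map_range' _ n j 0 hjn
        have hcs := colScan_succ li j (i - 1)
        rw [show i - 1 + 1 = i by omega] at hcs
        rw [show i + 1 - 1 = i by omega]
        unfold vnewR
        by_cases hc : pvE li i j = pvE li (i - 1) j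
        · rw [if_pos hc, hgd, hcs, if_pos hc.symm]
        · rw [if_neg hc, hcs, if_neg (fun hx => hc hx.symm)]
      refine ⟨R ++ (List.range n).flatMap
          (fun j => hemitR li i j ++ vemitR li i ((List.range n).map (fun j => (colScan li j (i - 1)).2)) j)
          ++ [hlastR li i n], ?_, ?_⟩
      · rw [Prod.ext_iff]
        refine ⟨hmapeq, ?_⟩
        simp [List.append_assoc]
      · -- multiset bookkeeping
        have hcoe : (↑(R ++ (List.range n).flatMap
            (fun j => hemitR li i j ++ vemitR li i ((List.range n).map (fun j => (colScan li j (i - 1)).2)) j)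
            ++ [hlastR li i n]) : Multiset Int)
            = (↑R : Multiset Int)
              + ((List.range n).map (fun j => (↑(hemitR li i j) : Multiset Int))).sum
              + ((List.range n).map (fun j =>
                  (↑(vemitR li i ((List.range n).map (fun j => (colScan li j (i - 1)).2)) j) : Multiset Int))).sum
              + (↑([hlastR li i n]) : Multiset Int) := by
          rw [← Multiset.coe_add, ← Multiset.coe_add, coe_flatMap_sum]
          have : (List.range n).map (fun j =>
              (↑(hemitR li i j ++ vemitR li i ((List.range n).map (fun j => (colScan li j (i - 1)).2)) j) : Multiset Int))
              = (List.range n).map (fun j =>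
                (↑(hemitR li i j) : Multiset Int)
                + (↑(vemitR li i ((List.range n).map (fun j => (colScan li j (i - 1)).2)) j) : Multiset Int)) := by
            apply List.map_congr_left
            intro j _
            rw [← Multiset.coe_add]
          rw [this, List.sum_map_add]
          abel
        rw [hcoe, hR]
        have hrowi : ((List.range n).map (fun j => (↑(hemitR li i j) : Multiset Int))).sum
            + (↑([hlastR li i n]) : Multiset Int)
            = (↑(runsOf (pvRow li n i)) : Multiset Int) := by
          rw [← coe_flatMap_sum, Multiset.coe_add]
          exact congrArg _ (hruns li i n (by omega))
        have hcol : ∀ j ∈ List.range n,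
            (↑((colScan li j (i + 1 - 1)).1) : Multiset Int)
            = (↑((colScan li j (i - 1)).1) : Multiset Int)
              + (↑(vemitR li i ((List.range n).map (fun j => (colScan li j (i - 1)).2)) j) : Multiset Int) := by
          intro j hj
          have hjn : j < n := List.mem_range.1 hj
          have hgd : ((List.range n).map (fun j => (colScan li j (i - 1)).2)).getD j 0
              = (colScan li j (i - 1)).2 := getD_map_range' _ n j 0 hjn
          have hcs := colScan_succ li j (i - 1)
          rw [show i - 1 + 1 = i by omega] at hcs
          rw [show i + 1 - 1 = i by omega, hcs]
          unfold vemitR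
          by_cases hc : pvE li i j = pvE li (i - 1) j
          · rw [if_pos hc.symm, if_pos hc]
            simp
          · rw [if_neg (fun hx => hc hx.symm), if_neg hc, hgd]
            simp [← Multiset.coe_add]
        have hcols : ((List.range n).map (fun j => (↑((colScan li j (i + 1 - 1)).1) : Multiset Int))).sum
            = ((List.range n).map (fun j => (↑((colScan li j (i - 1)).1) : Multiset Int))).sum
              + ((List.range n).map (fun j =>
                  (↑(vemitR li i ((List.range n).map (fun j => (colScan li j (i - 1)).2)) j) : Multiset Int))).sum := by
          rw [← List.sum_map_add]
          apply congrArg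
          exact List.map_congr_left hcol
        rw [List.map_append, List.sum_append, hcols]
        simp only [List.map_cons, List.map_nil, List.sum_cons, List.sum_nil, add_zero]
        rw [← hrowi]
        abel

theorem coe_map_singleton_sum (l : List Nat) (g : Nat → Int) :
    (↑(l.map g) : Multiset Int) = (l.map (fun j => (↑[g j] : Multiset Int))).sum := by
  induction l with
  | nil => simp
  | cons a t ih => simp [List.map_cons, List.sum_cons, ih, ← Multiset.cons_coe, Multiset.singleton_add]

theorem perm_final (li : List (List String)) (hn : li ≠ []) :
    ∃ st : List Int × List Int,
      (List.range li.length).foldl (bouter li li.length) (List.replicate li.length 1, []) = st ∧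
      (st.2 ++ st.1).Perm (cntA li) := by
  have hpos : 0 < li.length := List.length_pos_iff.2 hn
  obtain ⟨R, hfold, hR⟩ := bOuterInv li li.length rfl li.length hpos (le_refl _)
  refine ⟨_, hfold, ?_⟩
  rw [← Multiset.coe_eq_coe]
  unfold cntA
  simp only [← Multiset.coe_add]
  rw [hR, coe_flatMap_sum, coe_flatMap_sum]
  have hcol : ∀ j ∈ List.range li.length, (↑(runsOf (pvCol li li.length j)) : Multiset Int)
      = (↑((colScan li j (li.length - 1)).1) : Multiset Int)
        + (↑([(colScan li j (li.length - 1)).2]) : Multiset Int) := by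
    intro j _
    have hdec : pvCol li li.length j
        = pvE li 0 j :: (List.range (li.length - 1)).map (fun k => pvE li (k + 1) j) := by
      unfold pvCol
      obtain ⟨m, hm⟩ : ∃ m, li.length = m + 1 := ⟨li.length - 1, by omega⟩
      rw [hm, range_map_decomp (fun i => pvE li i j) m, Nat.add_sub_cancel]
    rw [hdec]
    unfold runsOf colScan
    rw [← Multiset.coe_add]
  rw [List.map_congr_left hcol, List.sum_map_add]
  rw [coe_map_singleton_sum (List.range li.length) (fun j => (colScan li j (li.length - 1)).2)]
  abel

-- ===== VERDICT (by name: the statement is the Claim_ definition above) =====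
theorem check_spec : Claim_equal_check := by
  intro li _ hpre
  unfold Spec_check
  obtain ⟨st, hst, hperm⟩ := perm_final li hpre.1
  rw [check_eq_cntA li hpre.1, check_alt_eq_fold li]
  simp only [hst]
  rw [max?_perm _ _ hperm]
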